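-- pv_equiv track=rewrite | github.com/ColaberryIntern/AgentFoundry | services/model-server/app/models/taxonomy_classifier.py | _infer_cluster_label
-- ===== SOURCE A (Python) =====
-- def _infer_cluster_label(members: list[dict]) -> str:
--     """Infer a human-readable label for a cluster from member titles."""
--     # Use the most common provided category, or synthesize from titles
--     categories = [m.get("category", "") for m in members if m.get("category")]
--     if categories:
--         from collections import Counter
--         most_common = Counter(categories).most_common(1)[0][0]
--         return most_common
--
--     # Fall back to first member's title (truncated)
--     if members:
--         title = members[0].get("title", "Unknown")
--         return title[:50]
--     return "Unknown"
-- ===== SOURCE B (Python) =====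
-- def _infer_cluster_label(members: list[dict]) -> str:
--     """Infer a human-readable label for a cluster from member titles."""
--     categories = [m.get("category", "") for m in members if m.get("category")]
--     if categories:
--         # Sort a copy, scan the equal-value runs to find the maximal run length
--         # (= maximal frequency), then return the first-seen category among the
--         # maximal ones -- the same tie-break as Counter.most_common(1).
--         ordered = sorted(categories)
--         prev = None
--         run = 0
--         best = 0
--         winners = set()
--         for c in ordered:
--             if c == prev:
--                 run += 1
--             else:
--                 prev = c
--                 run = 1
--             if run > best:
--                 best = run
--                 winners = {c}
--             elif run == best:
--                 winners.add(c)
--         for c in categories: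
--             if c in winners:
--                 return c
--
--     # Fall back to first member's title (truncated)
--     if members:
--         return members[0].get("title", "Unknown")[:50]
--     return "Unknown"
-- ===== Notes on version B (the rewrite author's own statement) =====
-- stated objective: alternative
-- what changed: Replaces the Counter hash-table frequency count with a sort-then-run-scan: sort the categories, scan the sorted list once tracking the current run length and the set of categories with maximal run length, then return the first-seen category in that set; fallbacks unchanged.
import Mathlib
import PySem

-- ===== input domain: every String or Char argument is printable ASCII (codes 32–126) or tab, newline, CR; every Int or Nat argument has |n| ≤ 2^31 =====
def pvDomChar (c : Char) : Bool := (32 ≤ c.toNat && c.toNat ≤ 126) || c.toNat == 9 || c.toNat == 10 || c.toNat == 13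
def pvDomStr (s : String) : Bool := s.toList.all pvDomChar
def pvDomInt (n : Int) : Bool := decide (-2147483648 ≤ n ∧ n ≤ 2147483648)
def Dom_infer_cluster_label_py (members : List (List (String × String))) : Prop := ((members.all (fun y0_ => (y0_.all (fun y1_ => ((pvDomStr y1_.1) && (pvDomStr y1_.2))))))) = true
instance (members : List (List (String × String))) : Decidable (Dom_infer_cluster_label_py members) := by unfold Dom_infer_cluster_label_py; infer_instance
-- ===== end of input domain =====

-- B replaces A's Counter hash-table frequency count by sort-then-run-scan: sort the
-- categories, scan the runs of equal values tracking the maximal run length and the set of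
-- categories attaining it, then return the first-seen category in that set (objective:
-- alternative; same tie-break and fallbacks).

-- ===== PORT A =====
-- Counter(categories).most_common(1) is CPython's heapq.nlargest(1, items, key=itemgetter(1)),
-- i.e. a first-wins max scan over the counter's items (insertion = first-occurrence order);
-- ported as PySem.List.max? over (counter categories).items keyed by the stored count.
def infer_cluster_label_py (members : List (List (String × String))) : String :=
  let categories :=
    (members.filter (fun m => (PySem.Dict.mk m).getD "category" "" != "")).map
      (fun m => (PySem.Dict.mk m).getD "category" "")
  if categories ≠ [] then
    match PySem.List.max? (PySem.Dict.counter categories).items (fun p => p.2) with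
    | some p => p.1
    | none => ""  -- unreachable: categories ≠ [] so the counter has items
  else
    match members with
    | m0 :: _ => PySem.Str.slice ((PySem.Dict.mk m0).getD "title" "Unknown") none (some 50)
    | [] => "Unknown"

-- ===== PORT B =====
-- one step of B's run-scan loop over the sorted category list:
-- state = (prev, run, best, winners)
def pvStep (st : Option String × Int × Int × PySem.Set String) (c : String) :
    Option String × Int × Int × PySem.Set String :=
  let (prev, run, best, winners) := st
  let (prev2, run2) := if some c == prev then (prev, run + 1) else (some c, (1 : Int))
  if run2 > best then (prev2, run2, run2, PySem.Set.ofList [c])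
  else if run2 == best then (prev2, run2, best, PySem.Set.add winners c)
  else (prev2, run2, best, winners)

-- shared tail of B: the title fallback reached when no category was returned
def pvFallback (members : List (List (String × String))) : String :=
  match members with
  | m0 :: _ => PySem.Str.slice ((PySem.Dict.mk m0).getD "title" "Unknown") none (some 50)
  | [] => "Unknown"

def infer_cluster_label_py_alt (members : List (List (String × String))) : String :=
  let categories :=
    (members.filter (fun m => (PySem.Dict.mk m).getD "category" "" != "")).map
      (fun m => (PySem.Dict.mk m).getD "category" "")
  if categories ≠ [] then
    let ordered := PySem.List.sorted categories (fun x => x) false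
    let st := ordered.foldl pvStep (none, 0, 0, PySem.Set.ofList [])
    match categories.find? (fun c => (st.2.2.2).contains c) with
    | some c => c
    | none => pvFallback members   -- loop fell through: continue with the fallback code
  else pvFallback members

-- ===== PRECONDITION & SPEC =====
def Spec_infer_cluster_label_py (members : List (List (String × String))) (out : String) : Prop := out = infer_cluster_label_py_alt members
instance (members : List (List (String × String))) (out : String) : Decidable (Spec_infer_cluster_label_py members out) := by unfold Spec_infer_cluster_label_py; infer_instance

-- ===== CLAIM (what is proved, stated in full; the proofs are below) =====
def Claim_equal_infer_cluster_label_py : Prop := ∀ (members : List (List (String × String))), Dom_infer_cluster_label_py members → Spec_infer_cluster_label_py members (infer_cluster_label_py members)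

-- ===== LEMMAS AND PROOFS =====

-- ---------- A-side: Counter/most_common as a first-wins max scan ----------

-- max? over a nonempty list as a running-max fold with a bare accumulator
theorem pv_max?_foldl_some {α κ : Type} [LT κ] [DecidableLT κ] (f : α → κ) :
    ∀ (t : List α) (a : α),
      (List.foldl (fun acc x => match acc with
          | none => some x
          | some m => if f m < f x then some x else some m) (some a) t : Option α)
        = some (t.foldl (fun a x => if f a < f x then x else a) a) := by
  intro t
  induction t with
  | nil => intro a; rfl
  | cons x t ih =>
      intro a
      simp only [List.foldl]
      by_cases h : f a < f x <;> simp [h, ih]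

theorem pv_max?_cons {α κ : Type} [LT κ] [DecidableLT κ] (f : α → κ) (x : α) (t : List α) :
    PySem.List.max? (x :: t) f = some (t.foldl (fun a y => if f a < f y then y else a) x) := by
  simp only [PySem.List.max?, List.foldl]
  exact pv_max?_foldl_some f t x

-- max? commutes with map
theorem pv_max?_map {α β κ : Type} [LT κ] [DecidableLT κ] (g : α → β) (f : β → κ) :
    ∀ (l : List α) (o : Option α),
      (List.foldl (fun acc x => match acc with
          | none => some x
          | some m => if f m < f x then some x else some m) (Option.map g o) (l.map g) : Option β)
        = Option.map g (List.foldl (fun acc x => match acc with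
          | none => some x
          | some m => if f (g m) < f (g x) then some x else some m) o l) := by
  intro l
  induction l with
  | nil => intro o; rfl
  | cons x t ih =>
      intro o
      simp only [List.map, List.foldl]
      cases o with
      | none => exact ih (some x)
      | some m =>
          simp only [Option.map_some]
          by_cases h : f (g m) < f (g x) <;> simp only [h, if_true, if_false] <;>
            [exact ih (some x); exact ih (some m)]

theorem pv_max?_map' {α β κ : Type} [LT κ] [DecidableLT κ] (g : α → β) (f : β → κ) (l : List α) :
    PySem.List.max? (l.map g) f = Option.map g (PySem.List.max? l (fun x => f (g x))) := by
  simpa only [PySem.List.max?] using pv_max?_map g f l none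

-- dropping the Nat → Int cast in the key does not change max?
theorem pv_max?_intCast {α : Type} (g : α → Nat) (l : List α) :
    PySem.List.max? l (fun x => ((g x : Nat) : Int)) = PySem.List.max? l g := by
  simp only [PySem.List.max?]
  have hstep : (fun (acc : Option α) (x : α) => match acc with
      | none => some x
      | some m => if ((g m : Nat) : Int) < ((g x : Nat) : Int) then some x else some m)
      = (fun (acc : Option α) (x : α) => match acc with
      | none => some x
      | some m => if g m < g x then some x else some m) := by
    funext acc x
    cases acc with
    | none => rfl
    | some m => simp [Nat.cast_lt]
  exact congrFun (congrArg (fun f => List.foldl f (none : Option α)) hstep) l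

-- first-occurrence dedup relative to a seen-set (the shape of PySem.Set.ofList's fold)
def pvOg {α : Type} [BEq α] (seen : List α) : List α → List α
  | [] => []
  | x :: t => if seen.contains x then pvOg seen t else x :: pvOg (x :: seen) t

theorem pvOg_congr {α : Type} [BEq α] :
    ∀ (l s₁ s₂ : List α), (∀ a, s₁.contains a = s₂.contains a) → pvOg s₁ l = pvOg s₂ l := by
  intro l
  induction l with
  | nil => intro _ _ _; rfl
  | cons x t ih =>
      intro s₁ s₂ h
      simp only [pvOg, h x]
      by_cases hx : s₂.contains x = true
      · simp [hx, ih _ _ h]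
      · simp only [hx, if_false, Bool.false_eq_true]
        refine congrArg (x :: ·) (ih _ _ ?_)
        intro a; simp [List.contains_cons, h a]

theorem pv_ofList_og {α : Type} [BEq α] :
    ∀ (l s : List α), l.foldl PySem.Set.add s = s ++ pvOg s l := by
  intro l
  induction l with
  | nil => intro s; simp [pvOg]
  | cons x t ih =>
      intro s
      simp only [List.foldl, pvOg, PySem.Set.add, PySem.Set.contains]
      by_cases hx : s.contains x = true
      · rw [if_pos hx, if_pos hx]
        exact ih s
      · rw [if_neg hx, if_neg hx]
        rw [ih (s ++ [x]), List.append_assoc]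
        refine congrArg (s ++ ·) (congrArg (x :: ·) ?_)
        exact pvOg_congr t _ _ (by intro a; simp [List.contains_append, List.contains_cons, Bool.or_comm])

-- skipping already-seen elements (all of key ≤ key of the accumulator) leaves the scan unchanged
theorem pv_foldl_og {α κ : Type} [BEq α] [LawfulBEq α] [LinearOrder κ] (f : α → κ) :
    ∀ (l : List α) (seen : List α) (a : α), (∀ y ∈ seen, f y ≤ f a) →
      (pvOg seen l).foldl (fun a y => if f a < f y then y else a) a
        = l.foldl (fun a y => if f a < f y then y else a) a := by
  intro l
  induction l with
  | nil => intro _ _ _; rfl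
  | cons x t ih =>
      intro seen a hseen
      simp only [pvOg, List.foldl]
      by_cases hx : seen.contains x = true
      · have hxa : f x ≤ f a := hseen x (by simpa using hx)
        simp only [hx, if_true, not_lt.mpr hxa, if_false]
        exact ih seen a hseen
      · simp only [hx, if_false, List.foldl, Bool.false_eq_true]
        apply ih (x :: seen)
        intro y hy
        rcases List.mem_cons.mp hy with rfl | hy'
        · split_ifs with h
          · exact le_refl _
          · exact not_lt.mp h
        · have h1 : f y ≤ f a := hseen y hy'
          split_ifs with h
          · exact le_trans h1 (le_of_lt h)
          · exact h1

-- max? is unchanged by first-occurrence deduplication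
theorem pv_max?_ofList {α κ : Type} [BEq α] [LawfulBEq α] [LinearOrder κ] (f : α → κ) (l : List α) :
    PySem.List.max? (PySem.Set.ofList l) f = PySem.List.max? l f := by
  cases l with
  | nil => rfl
  | cons c rest =>
      have hof : PySem.Set.ofList (c :: rest) = c :: pvOg [c] rest := by
        rw [PySem.Set.ofList_eq_foldl]
        simp only [List.foldl]
        have : PySem.Set.add [] c = [c] := rfl
        rw [this, pv_ofList_og rest [c]]
        rfl
      rw [hof, pv_max?_cons, pv_max?_cons]
      rw [pv_foldl_og f rest [c] c (by intro y hy; simp at hy; simp [hy])]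

-- ---------- shared: first-wins max scan = "first element attaining the maximum" ----------

def pvMaxf (f : String → Nat) (a : Nat) (t : List String) : Nat :=
  t.foldl (fun m y => max m (f y)) a

theorem pvMaxf_le_start (f : String → Nat) : ∀ (t : List String) (a : Nat), a ≤ pvMaxf f a t := by
  intro t
  induction t with
  | nil => intro a; exact le_refl a
  | cons x t ih =>
      intro a
      exact le_trans (le_max_left a (f x)) (ih (max a (f x)))

theorem pvMaxf_le_mem (f : String → Nat) :
    ∀ (t : List String) (a : Nat) (y : String), y ∈ t → f y ≤ pvMaxf f a t := by
  intro t
  induction t with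
  | nil => intro a y hy; cases hy
  | cons x t ih =>
      intro a y hy
      rcases List.mem_cons.mp hy with rfl | hy'
      · exact le_trans (le_max_right a (f y)) (pvMaxf_le_start f t (max a (f y)))
      · exact ih (max a (f x)) y hy'

theorem pvMaxf_attain (f : String → Nat) :
    ∀ (t : List String) (a : Nat), pvMaxf f a t = a ∨ ∃ y ∈ t, f y = pvMaxf f a t := by
  intro t
  induction t with
  | nil => intro a; exact Or.inl rfl
  | cons x t ih =>
      intro a
      have hstep : pvMaxf f a (x :: t) = pvMaxf f (max a (f x)) t := rfl
      rcases ih (max a (f x)) with h | ⟨y, hy, hfy⟩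
      · rcases le_total a (f x) with hle | hle
        · refine Or.inr ⟨x, List.mem_cons_self, ?_⟩
          rw [hstep, h, max_eq_right hle]
        · left; rw [hstep, h, max_eq_left hle]
      · exact Or.inr ⟨y, List.mem_cons_of_mem x hy, by rw [hstep]; exact hfy⟩

-- the first-wins strict-replace max fold returns the FIRST element attaining the maximum
theorem pvFold_max (f : String → Nat) :
    ∀ (t : List String) (a : String),
      t.foldl (fun a y => if f a < f y then y else a) a
        = if pvMaxf f (f a) t ≤ f a then a
          else (t.find? (fun x => decide (pvMaxf f (f a) t ≤ f x))).getD a := by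
  intro t
  induction t with
  | nil => intro a; simp [pvMaxf]
  | cons x t ih =>
      intro a
      have hstep : ∀ b : Nat, pvMaxf f b (x :: t) = pvMaxf f (max b (f x)) t := fun _ => rfl
      by_cases h1 : f a < f x
      · -- accumulator becomes x
        have hmax : max (f a) (f x) = f x := max_eq_right (le_of_lt h1)
        have hM : pvMaxf f (f a) (x :: t) = pvMaxf f (f x) t := by rw [hstep, hmax]
        have hxM : f x ≤ pvMaxf f (f x) t := pvMaxf_le_start f t (f x)
        have haM : ¬ pvMaxf f (f a) (x :: t) ≤ f a := by
          rw [hM]; exact fun hc => absurd (le_trans hxM hc) (not_le.mpr h1)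
        have haM' : ¬ pvMaxf f (f x) t ≤ f a := hM ▸ haM
        simp only [List.foldl, if_pos h1, ih x, hM, List.find?]
        rw [if_neg haM']
        by_cases h2 : pvMaxf f (f x) t ≤ f x
        · simp [h2]
        · have hfind : (t.find? (fun y => decide (pvMaxf f (f x) t ≤ f y))).isSome := by
            rcases pvMaxf_attain f t (f x) with h | ⟨y, hy, hfy⟩
            · exact absurd (le_of_eq h) h2
            · exact List.find?_isSome.mpr ⟨y, hy, by simp [← hfy]⟩
          obtain ⟨r, hr⟩ := Option.isSome_iff_exists.mp hfind
          simp [h2, hr]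
      · -- accumulator stays a
        have hmax : max (f a) (f x) = f a := max_eq_left (not_lt.mp h1)
        have hM : pvMaxf f (f a) (x :: t) = pvMaxf f (f a) t := by rw [hstep, hmax]
        simp only [List.foldl, if_neg h1, ih a, hM, List.find?]
        by_cases h2 : pvMaxf f (f a) t ≤ f a
        · simp [h2]
        · have hxno : ¬ pvMaxf f (f a) t ≤ f x :=
            fun hc => h2 (le_trans hc (not_lt.mp h1))
          simp [h2, hxno]

-- ---------- B-side: the run-scan invariant over the sorted list ----------

theorem pv_contains_add (s : PySem.Set String) (c v : String) :
    (PySem.Set.add s c).contains v = (s.contains v || v == c) := by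
  by_cases hv : v = c
  · subst hv
    by_cases h : v ∈ s
    · simp [PySem.Set.add, PySem.Set.contains, h]
    · simp [PySem.Set.add, PySem.Set.contains, h]
  · have hvc : (v == c) = false := by simpa using hv
    by_cases h : c ∈ s
    · simp [PySem.Set.add, PySem.Set.contains, h, hvc]
    · simp [PySem.Set.add, PySem.Set.contains, h, hvc, hv]

-- the invariant after the loop has consumed the (nonempty, sorted) prefix pfx with last value p
def pvInv (pfx : List String) (p : String)
    (st : Option String × Int × Int × PySem.Set String) : Prop :=
  st.1 = some p ∧ p ∈ pfx ∧ (∀ q ∈ pfx, q ≤ p) ∧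
  st.2.1 = ((pfx.count p : Nat) : Int) ∧
  (∀ v, ((pfx.count v : Nat) : Int) ≤ st.2.2.1) ∧
  (∃ w ∈ pfx, ((pfx.count w : Nat) : Int) = st.2.2.1) ∧
  (∀ v, (st.2.2.2).contains v = true ↔ (v ∈ pfx ∧ ((pfx.count v : Nat) : Int) = st.2.2.1))

theorem pvStep_inv (pfx : List String) (p c : String)
    (st : Option String × Int × Int × PySem.Set String)
    (hle : ∀ q ∈ pfx, q ≤ c) (hinv : pvInv pfx p st) :
    pvInv (pfx ++ [c]) c (pvStep st c) := by
  obtain ⟨prev, run, best, winners⟩ := st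
  obtain ⟨h1, h2, h3, h4, h5, h6, h7⟩ := hinv
  replace h1 : prev = some p := h1
  replace h4 : run = ((pfx.count p : Nat) : Int) := h4
  replace h5 : ∀ v, ((pfx.count v : Nat) : Int) ≤ best := h5
  replace h6 : ∃ w ∈ pfx, ((pfx.count w : Nat) : Int) = best := h6
  replace h7 : ∀ v, winners.contains v = true ↔ (v ∈ pfx ∧ ((pfx.count v : Nat) : Int) = best) := h7
  subst h1
  -- counts in the extended prefix
  have hcc : (pfx ++ [c]).count c = pfx.count c + 1 := by simp
  have hcv : ∀ v, v ≠ c → (pfx ++ [c]).count v = pfx.count v := by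
    intro v hv
    have h0 : List.count v [c] = 0 := List.count_eq_zero.mpr (by simp [hv])
    simp [List.count_append, h0]
  have hmemc : c ∈ pfx ++ [c] := List.mem_append_right _ (List.mem_singleton.mpr rfl)
  have hmax' : ∀ q ∈ pfx ++ [c], q ≤ c := by
    intro q hq
    rcases List.mem_append.mp hq with h | h
    · exact hle q h
    · rw [List.mem_singleton.mp h]
  -- the run counter after the step equals the count of c in the extended prefix
  have hrun : (if some c == some p then ((some p : Option String), run + 1)
      else (some c, (1 : Int))) = (some c, (((pfx ++ [c]).count c : Nat) : Int)) := by
    by_cases hcp : c = p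
    · subst hcp
      simp only [BEq.rfl, if_pos]
      rw [hcc, h4]; push_cast; ring_nf
    · have hnot : c ∉ pfx := by
        intro hin
        exact hcp (le_antisymm (h3 c hin) (hle p h2))
      have : pfx.count c = 0 := List.count_eq_zero.mpr hnot
      simp only [beq_iff_eq, Option.some.injEq, if_neg hcp]
      rw [hcc, this]
      norm_num
    -- note: when c = p the first branch fires with prev = some p = some c
  -- abbreviations
  set n : Int := (((pfx ++ [c]).count c : Nat) : Int) with hn
  have hbound : ∀ v, v ≠ c → ((pfx ++ [c]).count v : Int) = ((pfx.count v : Nat) : Int) := by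
    intro v hv; rw [hcv v hv]
  unfold pvStep
  simp only [hrun]
  by_cases hgt : n > best
  · simp only [if_pos hgt]
    refine ⟨rfl, hmemc, hmax', rfl, ?_, ⟨c, hmemc, rfl⟩, ?_⟩
    · intro v
      by_cases hv : v = c
      · subst hv; exact le_refl _
      · rw [hbound v hv]; exact le_trans (h5 v) (le_of_lt hgt)
    · intro v
      have hof : PySem.Set.ofList [c] = [c] := rfl
      rw [hof]
      constructor
      · intro hcv'
        have : v = c := by simpa using hcv'
        subst this
        exact ⟨hmemc, rfl⟩
      · rintro ⟨hmem, hcnt⟩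
        by_cases hv : v = c
        · subst hv; simp
        · exfalso
          have hcnt2 : (((pfx ++ [c]).count v : Nat) : Int) = n := hcnt
          rw [hbound v hv] at hcnt2
          have h5v := h5 v
          omega
  · simp only [if_neg hgt]
    by_cases heq : n = best
    · have hbeq : (n == best) = true := by simpa using heq
      simp only [hbeq, if_pos]
      refine ⟨rfl, hmemc, hmax', rfl, ?_, ⟨c, hmemc, heq⟩, ?_⟩
      · intro v
        by_cases hv : v = c
        · subst hv; exact le_of_eq heq
        · rw [hbound v hv]; exact h5 v
      · intro v
        rw [pv_contains_add]
        by_cases hv : v = c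
        · subst hv
          simp only [BEq.rfl, Bool.or_true, true_iff]
          refine ⟨hmemc, ?_⟩
          show (((pfx ++ [v]).count v : Nat) : Int) = best
          omega
        · have hvc : (v == c) = false := by simpa using hv
          simp only [hvc, Bool.or_false]
          rw [h7 v, hbound v hv]
          constructor
          · rintro ⟨hm, hc'⟩; exact ⟨List.mem_append_left _ hm, hc'⟩
          · rintro ⟨hm, hc'⟩
            rcases List.mem_append.mp hm with h | h
            · exact ⟨h, hc'⟩
            · exact absurd (List.mem_singleton.mp h) hv
    · have hbeq : (n == best) = false := by simpa using heq
      simp only [hbeq, Bool.false_eq_true, if_false]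
      have hlt : n < best := lt_of_le_of_ne (not_lt.mp hgt) heq
      refine ⟨rfl, hmemc, hmax', rfl, ?_, ?_, ?_⟩
      · intro v
        by_cases hv : v = c
        · subst hv; exact le_of_lt hlt
        · rw [hbound v hv]; exact h5 v
      · obtain ⟨w, hw, hwc⟩ := h6
        refine ⟨w, List.mem_append_left _ hw, ?_⟩
        have hwc' : w ≠ c := by
          intro hwec
          subst hwec
          -- then w = c ∈ pfx, so c = p and the run counter contradicts n < best
          have hcp : w = p := le_antisymm (h3 w hw) (hle p h2)
          subst hcp
          have : n = ((pfx.count w : Nat) : Int) + 1 := by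
            rw [hn, hcc]; push_cast; ring
          omega
        have hwc2 : ((pfx.count w : Nat) : Int) = best := hwc
        rw [hbound w hwc']
        exact hwc2
      · intro v
        by_cases hv : v = c
        · subst hv
          constructor
          · intro hcv'
            obtain ⟨hm, hc'⟩ := (h7 v).mp hcv'
            exfalso
            have hcp : v = p := le_antisymm (h3 v hm) (hle p h2)
            subst hcp
            have : n = ((pfx.count v : Nat) : Int) + 1 := by
              rw [hn, hcc]; push_cast; ring
            omega
          · rintro ⟨_, hc'⟩
            have hc2 : (((pfx ++ [v]).count v : Nat) : Int) = best := hc'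
            exfalso; omega
        · rw [h7 v, hbound v hv]
          constructor
          · rintro ⟨hm, hc'⟩; exact ⟨List.mem_append_left _ hm, hc'⟩
          · rintro ⟨hm, hc'⟩
            rcases List.mem_append.mp hm with h | h
            · exact ⟨h, hc'⟩
            · exact absurd (List.mem_singleton.mp h) hv

theorem pvFold_inv :
    ∀ (s pfx : List String) (p : String) (st : Option String × Int × Int × PySem.Set String),
      (∀ q ∈ pfx, ∀ r ∈ s, q ≤ r) → s.Pairwise (· ≤ ·) → pvInv pfx p st →
      ∃ q, pvInv (pfx ++ s) q (s.foldl pvStep st) := by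
  intro s
  induction s with
  | nil => intro pfx p st _ _ hinv; exact ⟨p, by simpa using hinv⟩
  | cons c s ih =>
      intro pfx p st hcross hpw hinv
      have hle : ∀ q ∈ pfx, q ≤ c := fun q hq => hcross q hq c List.mem_cons_self
      have hstep := pvStep_inv pfx p c st hle hinv
      have hcross' : ∀ q ∈ pfx ++ [c], ∀ r ∈ s, q ≤ r := by
        intro q hq r hr
        rcases List.mem_append.mp hq with h | h
        · exact hcross q h r (List.mem_cons_of_mem c hr)
        · rw [List.mem_singleton.mp h]
          exact (List.pairwise_cons.mp hpw).1 r hr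
      obtain ⟨q, hq⟩ := ih (pfx ++ [c]) c (pvStep st c) hcross' (List.pairwise_cons.mp hpw).2 hstep
      refine ⟨q, ?_⟩
      simpa [List.foldl] using hq

-- the final state of B's scan: best is attained, bounds every count, and winners holds
-- exactly the categories of maximal count
theorem pvB_final (cats : List String) (h : cats ≠ []) :
    ∃ best : Int,
      ((PySem.List.sorted cats (fun x => x) false).foldl pvStep
          ((none : Option String), (0 : Int), (0 : Int), PySem.Set.ofList [])).2.2.1 = best ∧
      (∀ v, ((cats.count v : Nat) : Int) ≤ best) ∧
      (∃ w ∈ cats, ((cats.count w : Nat) : Int) = best) ∧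
      (∀ v, (((PySem.List.sorted cats (fun x => x) false).foldl pvStep
          ((none : Option String), (0 : Int), (0 : Int), PySem.Set.ofList [])).2.2.2).contains v = true
          ↔ (v ∈ cats ∧ ((cats.count v : Nat) : Int) = best)) := by
  set s := PySem.List.sorted cats (fun x => x) false with hs
  have hperm : s.Perm cats := PySem.List.sorted_perm cats (fun x => x) false
  have hsne : s ≠ [] := by
    intro hnil
    exact h ((hnil ▸ hperm).symm.eq_nil)
  obtain ⟨c0, s', hcs⟩ : ∃ c0 s', s = c0 :: s' := by
    cases hsc : s with
    | nil => exact absurd hsc hsne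
    | cons a b => exact ⟨a, b, rfl⟩
  have hpw : s.Pairwise (· ≤ ·) := by
    have := PySem.List.sorted_pairwise cats (fun x => x)
    simpa [hs] using this
  -- the first iteration
  have hst1 : pvStep ((none : Option String), (0 : Int), (0 : Int), PySem.Set.ofList []) c0
      = (some c0, 1, 1, PySem.Set.ofList [c0]) := rfl
  have hinv1 : pvInv [c0] c0 (some c0, 1, 1, PySem.Set.ofList [c0]) := by
    refine ⟨rfl, List.mem_singleton.mpr rfl, ?_, by simp, ?_, ⟨c0, List.mem_singleton.mpr rfl, by simp⟩, ?_⟩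
    · intro q hq; rw [List.mem_singleton.mp hq]
    · intro v
      have hle1 : List.count v [c0] ≤ 1 := by
        simp only [List.count_singleton]
        split <;> simp
      show ((List.count v [c0] : Nat) : Int) ≤ (1 : Int)
      exact_mod_cast hle1
    · intro v
      have hof : PySem.Set.ofList [c0] = [c0] := rfl
      rw [hof]
      by_cases hv : v = c0
      · subst hv; simp
      · simp [List.count_singleton, hv]
  have hpwcs := hcs ▸ hpw
  obtain ⟨q, hq⟩ := pvFold_inv s' [c0] c0 (some c0, 1, 1, PySem.Set.ofList [c0])
    (by
      intro a ha r hr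
      rw [List.mem_singleton.mp ha]
      exact (List.pairwise_cons.mp hpwcs).1 r hr)
    (List.pairwise_cons.mp hpwcs).2 hinv1
  have hfold : s.foldl pvStep ((none : Option String), (0 : Int), (0 : Int), PySem.Set.ofList [])
      = s'.foldl pvStep (some c0, 1, 1, PySem.Set.ofList [c0]) := by
    rw [hcs]
    show List.foldl pvStep (pvStep _ c0) s' = _
    rw [hst1]
  have hq' : pvInv s q (s'.foldl pvStep (some c0, 1, 1, PySem.Set.ofList [c0])) := by
    have : ([c0] ++ s' : List String) = s := by rw [hcs]; rfl
    rwa [this] at hq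
  obtain ⟨_, _, _, _, h5, h6, h7⟩ := hq'
  have hcount : ∀ v, s.count v = cats.count v := fun v => hperm.count_eq v
  refine ⟨(s'.foldl pvStep (some c0, 1, 1, PySem.Set.ofList [c0])).2.2.1, by rw [hfold], ?_, ?_, ?_⟩
  · intro v; rw [← hcount v]; exact h5 v
  · obtain ⟨w, hw, hwc⟩ := h6
    exact ⟨w, hperm.mem_iff.mp hw, by rw [← hcount w]; exact hwc⟩
  · intro v
    rw [hfold, h7 v, hcount v, hperm.mem_iff]

-- ===== VERDICT (by name: the statement is the Claim_ definition above) =====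

theorem infer_cluster_label_py_spec : Claim_equal_infer_cluster_label_py := by
  unfold Claim_equal_infer_cluster_label_py
  intro members _dom
  unfold Spec_infer_cluster_label_py infer_cluster_label_py infer_cluster_label_py_alt
  set cats := (members.filter (fun m => (PySem.Dict.mk m).getD "category" "" != "")).map
      (fun m => (PySem.Dict.mk m).getD "category" "") with hcats
  by_cases hc : cats = []
  · simp only [hc, ne_eq, not_true_eq_false, if_false]
    cases members <;> rfl
  · simp only [hc, ne_eq, not_false_iff, if_true]
    obtain ⟨c, rest, hcr⟩ : ∃ c rest, cats = c :: rest := by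
      cases hcc : cats with
      | nil => exact absurd hcc hc
      | cons a b => exact ⟨a, b, rfl⟩
    set f : String → Nat := fun v => cats.count v with hf
    -- A's branch value is the first-wins max scan over the distinct categories by count
    have hA : PySem.List.max? (PySem.Dict.counter cats).items (fun p => p.2)
        = Option.map (fun k => (k, ((cats.count k : Nat) : Int))) (PySem.List.max? cats f) := by
      rw [PySem.Dict.items_counter, pv_max?_map' (fun k => (k, ((cats.count k : Nat) : Int))) (fun p => p.2)]
      simp only []
      rw [pv_max?_intCast (fun k => cats.count k), pv_max?_ofList]
    have hAfold : PySem.List.max? cats f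
        = some (rest.foldl (fun a y => if f a < f y then y else a) c) := by
      rw [hcr]; exact pv_max?_cons f c rest
    -- B's winners set is exactly the categories attaining the maximal count
    obtain ⟨best, hbdef, hb1, hb2, hb3⟩ := pvB_final cats hc
    set Mv : Nat := pvMaxf f (f c) rest with hMv
    have hcmem : c ∈ cats := by rw [hcr]; exact List.mem_cons_self
    have hfc_pos : 1 ≤ f c := List.count_pos_iff.mpr hcmem
    have hbM : best = ((Mv : Nat) : Int) := by
      apply le_antisymm
      · obtain ⟨w, hw, hwc⟩ := hb2
        rw [← hwc]
        have : f w ≤ Mv := by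
          rw [hcr] at hw
          rcases List.mem_cons.mp hw with rfl | hw'
          · exact pvMaxf_le_start f rest (f w)
          · exact pvMaxf_le_mem f rest (f c) w hw'
        exact_mod_cast this
      · rcases pvMaxf_attain f rest (f c) with h | ⟨y, hy, hfy⟩
        · rw [hMv, h]; exact hb1 c
        · rw [hMv, ← hfy]; exact hb1 y
    have hble : ∀ v, f v ≤ Mv := by
      intro v
      have := hb1 v
      rw [hbM] at this
      exact_mod_cast this
    -- winners membership is exactly "count v = Mv", i.e. "Mv ≤ count v"
    have hcont : ∀ v, (((PySem.List.sorted cats (fun x => x) false).foldl pvStep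
        ((none : Option String), (0 : Int), (0 : Int), PySem.Set.ofList [])).2.2.2).contains v
        = decide (Mv ≤ f v) := by
      intro v
      by_cases hv : Mv ≤ f v
      · have hfv : f v = Mv := le_antisymm (hble v) hv
        have hvmem : v ∈ cats := by
          apply List.count_pos_iff.mp
          show 0 < f v
          have hcM : f c ≤ Mv := by rw [hMv]; exact pvMaxf_le_start f rest (f c)
          omega
        rw [(hb3 v).mpr ⟨hvmem, by show ((f v : Nat) : Int) = best; rw [hfv, hbM]⟩]
        simp [hv]
      · cases hcv : (((PySem.List.sorted cats (fun x => x) false).foldl pvStep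
            ((none : Option String), (0 : Int), (0 : Int), PySem.Set.ofList [])).2.2.2).contains v with
        | false => simp [hv]
        | true =>
            exfalso
            obtain ⟨_, hcnt⟩ := (hb3 v).mp hcv
            rw [hbM] at hcnt
            exact hv (le_of_eq (by exact_mod_cast hcnt.symm))
    -- both branches compute the first element of cats whose count attains Mv
    rw [hA, hAfold]
    simp only [Option.map_some]
    have hBfind : cats.find? (fun v => (((PySem.List.sorted cats (fun x => x) false).foldl pvStep
        ((none : Option String), (0 : Int), (0 : Int), PySem.Set.ofList [])).2.2.2).contains v)
        = cats.find? (fun v => decide (Mv ≤ f v)) := by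
      have hpred : (fun v => (((PySem.List.sorted cats (fun x => x) false).foldl pvStep
          ((none : Option String), (0 : Int), (0 : Int), PySem.Set.ofList [])).2.2.2).contains v)
          = (fun v => decide (Mv ≤ f v)) := funext hcont
      rw [hpred]
    rw [hBfind, pvFold_max f rest c, hcr]
    simp only [List.find?]
    by_cases h2 : Mv ≤ f c
    · have h2' : pvMaxf f (f c) rest ≤ f c := h2
      have hd : (decide (Mv ≤ f c)) = true := by simpa using h2
      simp [h2', hd]
    · have hh : (decide (Mv ≤ f c)) = false := by simp [h2]
      have h2' : ¬ pvMaxf f (f c) rest ≤ f c := h2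
      rw [if_neg h2', ← hMv]
      -- the maximum is attained in rest, so the find? succeeds
      have hfind : (rest.find? (fun x => decide (Mv ≤ f x))).isSome := by
        obtain ⟨w, hw, hwc⟩ := hb2
        have hfw : f w = Mv := by
          rw [hbM] at hwc
          exact_mod_cast hwc
        have hwne : w ≠ c := by
          intro hwec; subst hwec; exact h2 (le_of_eq hfw.symm)
        have hwrest : w ∈ rest := by
          rw [hcr] at hw
          rcases List.mem_cons.mp hw with h | h
          · exact absurd h hwne
          · exact h
        exact List.find?_isSome.mpr ⟨w, hwrest, by simp [hfw]⟩
      obtain ⟨r, hr⟩ := Option.isSome_iff_exists.mp hfind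
      simp [hh, hr]
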